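-- pv_equiv track=rewrite | github.com/stopkite/Python-Algorithm | 프로그래머스/Lv1/크기가 작은 부분 문자열.py | solution
-- ===== SOURCE A (Python) =====
-- def solution(t, p):
--     answer = 0
--     temp = []
--     for i in range(len(t) - len(p) + 1):
--         temp.append(int(t[i:i + len(p)]))
--
--     cnt = 0
--
--     for i in range(len(temp)):
--         if temp[i] <= int(p):
--             cnt += 1
--
--     return cnt
-- ===== SOURCE B (Python) =====
-- def solution(t, p):
--     n = len(p)
--     vals = sorted(int(t[i:i + n]) for i in range(len(t) - n + 1))
--     if not vals:
--         return 0
--     limit = int(p)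
--     cnt = 0
--     for v in vals:
--         if v > limit:
--             break
--         cnt += 1
--     return cnt
-- ===== Notes on version B (the rewrite author's own statement) =====
-- stated objective: alternative
-- what changed: A builds the window-value list and rescans it comparing every value to int(p); B sorts the window values once and counts only the leading prefix of values <= int(p), breaking at the first larger one (order-then-prefix-count instead of scan-all).
import Mathlib
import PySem

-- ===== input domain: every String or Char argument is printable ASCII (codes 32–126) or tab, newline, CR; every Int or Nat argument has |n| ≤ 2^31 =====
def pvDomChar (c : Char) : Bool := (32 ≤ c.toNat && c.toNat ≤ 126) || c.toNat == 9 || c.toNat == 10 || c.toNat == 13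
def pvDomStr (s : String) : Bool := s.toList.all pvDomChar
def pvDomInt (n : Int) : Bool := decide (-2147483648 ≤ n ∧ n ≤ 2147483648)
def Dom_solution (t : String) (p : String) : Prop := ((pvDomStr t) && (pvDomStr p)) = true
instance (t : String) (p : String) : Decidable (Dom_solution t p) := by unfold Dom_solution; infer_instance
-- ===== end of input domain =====

-- B replaces A's scan-all-windows-against-int(p) with sort-then-early-exit: it sorts the
-- window values and counts the prefix that is <= int(p), stopping at the first larger value
-- (objective: alternative).

-- ===== PORT A =====
def solution (t : String) (p : String) : Int :=
  -- temp built by appending int(t[i:i+len(p)]) for each i in range(len(t)-len(p)+1)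
  let temp : List Int :=
    (PySem.List.pyRange 0 (PySem.Str.len t - PySem.Str.len p + 1)).foldl
      (fun acc i =>
        acc ++ [(PySem.Int.ofStr? (PySem.Str.slice t (some i) (some (i + PySem.Str.len p)))).getD 0]) []
  -- second loop: for i in range(len(temp)): if temp[i] <= int(p): cnt += 1
  (PySem.List.pyRange 0 (PySem.List.len temp)).foldl
    (fun cnt i =>
      if PySem.List.pyGetD temp i 0 ≤ (PySem.Int.ofStr? p).getD 0 then cnt + 1 else cnt) 0

-- ===== PORT B =====
-- the 'for v in vals: if v > limit: break; cnt += 1' loop of Source B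
def countUntilGT (limit : Int) : List Int → Int
  | [] => 0
  | v :: rest => if v > limit then 0 else countUntilGT limit rest + 1

def solution_alt (t : String) (p : String) : Int :=
  let n := PySem.Str.len p
  let vals := PySem.List.sorted
    ((PySem.List.pyRange 0 (PySem.Str.len t - n + 1)).map
      (fun i => (PySem.Int.ofStr? (PySem.Str.slice t (some i) (some (i + n)))).getD 0))
    (fun x => x) false
  if vals = [] then 0
  else
    let limit := (PySem.Int.ofStr? p).getD 0
    countUntilGT limit vals

-- ===== PRECONDITION & SPEC =====
-- Pre_: exactly the inputs where Python A returns — every length-len(p) window of t parses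
-- as an int, and (when at least one window exists) p itself parses; elsewhere int() raises ValueError.
def Pre_solution (t : String) (p : String) : Prop :=
  (PySem.Str.len p ≤ PySem.Str.len t → (PySem.Int.ofStr? p).isSome = true) ∧
  ∀ i ∈ PySem.List.pyRange 0 (PySem.Str.len t - PySem.Str.len p + 1),
    (PySem.Int.ofStr? (PySem.Str.slice t (some i) (some (i + PySem.Str.len p)))).isSome = true
instance (t : String) (p : String) : Decidable (Pre_solution t p) := by
  unfold Pre_solution; infer_instance

def pvWitness_solution : String × String := ("3141592", "271")

def Spec_solution (t : String) (p : String) (out : Int) : Prop := out = solution_alt t p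
instance (t : String) (p : String) (out : Int) : Decidable (Spec_solution t p out) := by
  unfold Spec_solution; infer_instance

-- ===== CLAIM (what is proved, stated in full; the proofs are below) =====
def Claim_equal_solution : Prop :=
  ∀ (t : String) (p : String), Dom_solution t p → Pre_solution t p → Spec_solution t p (solution t p)

-- ===== LEMMAS AND PROOFS =====

-- A's two loops compute the count of window values ≤ int(p)
theorem solution_eq_countP (t p : String) :
    solution t p =
      ((((PySem.List.pyRange 0 (PySem.Str.len t - PySem.Str.len p + 1)).map
          (fun i => (PySem.Int.ofStr? (PySem.Str.slice t (some i) (some (i + PySem.Str.len p)))).getD 0)).countP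
        (fun v => decide (v ≤ (PySem.Int.ofStr? p).getD 0))) : Nat) := by
  simp only [solution, PySem.List.foldl_append_singleton_eq_map, List.nil_append]
  set f : Int → Int := fun i =>
    (PySem.Int.ofStr? (PySem.Str.slice t (some i) (some (i + PySem.Str.len p)))).getD 0 with hf
  set L : Int := PySem.Str.len t - PySem.Str.len p + 1 with hL
  set pv : Int := (PySem.Int.ofStr? p).getD 0 with hpv
  set m : Nat := (PySem.List.pyRange 0 L).length with hm
  have hrange : PySem.List.pyRange 0 L = PySem.List.pyRange 0 (m : Int) := by
    by_cases h : L ≤ 0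
    · have h0 : PySem.List.pyRange 0 L = [] := by
        simp [PySem.List.pyRange]; omega
      simp [hm, h0]
    · have h' : 0 < L := by omega
      have hLm : (m : Int) = L := by
        rw [hm, PySem.List.length_pyRange_one]
        omega
      rw [hLm]
  have hlen : PySem.List.len ((PySem.List.pyRange 0 L).map f) = (m : Int) := by
    simp [PySem.List.len, hm]
  rw [hlen, hrange]
  have hcnt : ∀ (l : List Int),
      List.foldl (fun cnt i =>
          if PySem.List.pyGetD ((PySem.List.pyRange 0 (m : Int)).map f) i 0 ≤ pv then cnt + 1 else cnt) 0 l
        = ((l.countP (fun i =>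
            decide (PySem.List.pyGetD ((PySem.List.pyRange 0 (m : Int)).map f) i 0 ≤ pv))) : Int) := by
    intro l
    simpa using PySem.List.foldl_count_if
      (fun i => decide (PySem.List.pyGetD ((PySem.List.pyRange 0 (m : Int)).map f) i 0 ≤ pv)) l 0
  rw [hcnt]
  simp only [Int.natCast_inj]
  rw [PySem.List.pyRange_zero_natCast, List.countP_map, List.countP_map, List.countP_map]
  apply List.countP_congr
  intro k hk
  have hkm : k < m := List.mem_range.mp hk
  simp only [Function.comp_apply]
  rw [← PySem.List.pyRange_zero_natCast, PySem.List.pyGetD_map_pyRange f m k 0 hkm]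

-- on a nondecreasing list, counting up to the first element > limit counts all elements ≤ limit
theorem countUntilGT_eq_countP (limit : Int) (l : List Int)
    (h : l.Pairwise (· ≤ ·)) :
    countUntilGT limit l = ((l.countP (fun v => decide (v ≤ limit))) : Nat) := by
  induction l with
  | nil => simp [countUntilGT]
  | cons v rest ih =>
    rcases List.pairwise_cons.mp h with ⟨hv, hrest⟩
    by_cases hgt : v > limit
    · have hz : rest.countP (fun v => decide (v ≤ limit)) = 0 := by
        apply List.countP_eq_zero.mpr
        intro x hx
        have := hv x hx
        simp only [decide_eq_true_eq]
        omega
      simp [countUntilGT, hgt, hz, show ¬ (v ≤ limit) by omega]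
    · simp only [not_lt] at hgt
      simp [countUntilGT, show ¬ (v > limit) by omega, ih hrest, hgt]

theorem solution_eq_alt (t p : String) : solution t p = solution_alt t p := by
  rw [solution_eq_countP]
  simp only [solution_alt]
  set f : Int → Int := fun i =>
    (PySem.Int.ofStr? (PySem.Str.slice t (some i) (some (i + PySem.Str.len p)))).getD 0 with hf
  set xs : List Int := (PySem.List.pyRange 0 (PySem.Str.len t - PySem.Str.len p + 1)).map f with hxs
  set pv : Int := (PySem.Int.ofStr? p).getD 0 with hpv
  by_cases hnil : PySem.List.sorted xs (fun x => x) false = []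
  · have hx : xs = [] := (PySem.List.sorted_eq_nil_iff xs (fun x => x) false).mp hnil
    rw [hx] at hnil
    rw [hx, if_pos hnil]
    simp
  · rw [if_neg hnil]
    rw [countUntilGT_eq_countP pv _ (by simpa using PySem.List.sorted_pairwise xs (fun x => x))]
    congr 1
    exact ((PySem.List.sorted_perm xs (fun x => x) false).countP_eq _).symm

-- ===== VERDICT (by name: the statement is the Claim_ definition above) =====
theorem solution_spec : Claim_equal_solution := by
  intro t p _ _
  unfold Spec_solution
  exact solution_eq_alt t p
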